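-- pv_equiv track=rewrite | github.com/SeungAhSon/Baekjoon | SW_Expert_Academy/algorithm/algorithm_1.py | dfs
-- ===== SOURCE A (Python) =====
-- def dfs(node, path, cost, visited, cycle, min_cost, graph):
--     if node in visited:
--         if node == path[0] and cost <= min_cost:
--             cycle = path
--             min_cost = cost
--         return cycle, min_cost
--
--     visited.add(node)
--     for neighbor, edge_cost in graph[node]:
--         cycle, min_cost = dfs(neighbor, path+[neighbor], cost+edge_cost, visited, cycle, min_cost, graph)
--     visited.remove(node)
--     return cycle, min_cost
-- ===== SOURCE B (Python) =====
-- def dfs(node, path, cost, visited, cycle, min_cost, graph):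
--     # Iterative DFS with an explicit stack of frames carrying immutable
--     # visited snapshots, folding the best (cycle, min_cost) as candidates pop.
--     best = (cycle, min_cost)
--     stack = [(node, path, cost, frozenset(visited))]
--     while stack:
--         n, p, c, vis = stack.pop()
--         if n in vis:
--             if n == p[0] and c <= best[1]:
--                 best = (p, c)
--             continue
--         nvis = vis | {n}
--         for nb, ec in reversed(graph[n]):
--             stack.append((nb, p + [nb], c + ec, nvis))
--     return best
-- ===== Notes on version B (the rewrite author's own statement) =====
-- stated objective: alternative
-- what changed: A is a recursion that mutates/restores a shared visited set and threads the (cycle, min_cost) accumulator through every call; B is an iterative DFS over an explicit stack of frames carrying immutable visited snapshots, updating a single best pair as frames pop.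
import Mathlib
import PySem

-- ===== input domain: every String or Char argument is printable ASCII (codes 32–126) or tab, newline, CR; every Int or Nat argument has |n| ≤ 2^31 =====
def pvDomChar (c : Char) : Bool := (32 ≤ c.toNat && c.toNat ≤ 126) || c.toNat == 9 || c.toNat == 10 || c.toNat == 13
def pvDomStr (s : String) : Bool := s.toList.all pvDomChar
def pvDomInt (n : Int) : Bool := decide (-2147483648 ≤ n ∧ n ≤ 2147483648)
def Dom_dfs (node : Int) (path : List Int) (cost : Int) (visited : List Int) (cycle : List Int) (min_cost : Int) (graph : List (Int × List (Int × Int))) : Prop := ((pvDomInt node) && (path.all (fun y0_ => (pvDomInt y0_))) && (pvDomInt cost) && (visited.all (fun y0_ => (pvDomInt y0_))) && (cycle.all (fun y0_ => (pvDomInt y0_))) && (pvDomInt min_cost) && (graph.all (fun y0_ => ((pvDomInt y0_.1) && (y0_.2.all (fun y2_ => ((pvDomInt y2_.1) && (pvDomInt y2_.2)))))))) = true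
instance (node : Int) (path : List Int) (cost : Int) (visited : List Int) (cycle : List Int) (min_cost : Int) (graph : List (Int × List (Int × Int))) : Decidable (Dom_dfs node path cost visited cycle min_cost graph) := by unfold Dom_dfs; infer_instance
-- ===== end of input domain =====

-- B replaces A's recursion (mutate visited / recurse / restore) by an iterative DFS over an
-- explicit stack of frames carrying immutable visited snapshots, folding the best candidate as
-- frames pop (objective: alternative decomposition, same cost); equivalence is about the RETURN
-- value only — A temporarily mutates `visited` in place but restores it before returning.
-- Both ports are fuel-indexed (the fuel is always sufficient: A's recursion depth is bounded by
-- the number of graph keys, B's pop count by (#edges+1)^(#keys+1)); on inputs where the Python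
-- raises (excluded by Pre_) the ports return the junk value ([], 0) at the same point.

-- ===== PORT A =====
def dfsA : Nat → Int → List Int → Int → List Int → List Int → Int → List (Int × List (Int × Int)) → Option (List Int × Int)
  | 0, _, _, _, _, _, _, _ => none
  | fuel+1, node, path, cost, visited, cycle, min_cost, graph =>
    if PySem.Set.contains visited node then
      match path.head? with
      | none => none            -- path[0] : IndexError
      | some h =>
        if node = h ∧ cost ≤ min_cost then some (path, cost) else some (cycle, min_cost)
    else
      match (PySem.Dict.mk graph).get? node with
      | none => none            -- graph[node] : KeyError
      | some adj =>
        adj.foldl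
          (fun acc pr => acc.bind fun cm =>
            dfsA fuel pr.1 (path ++ [pr.1]) (cost + pr.2) (PySem.Set.add visited node) cm.1 cm.2 graph)
          (some (cycle, min_cost))
        -- visited.remove(node) restores `visited`; the return value does not contain it

def dfs (node : Int) (path : List Int) (cost : Int) (visited : List Int) (cycle : List Int) (min_cost : Int) (graph : List (Int × List (Int × Int))) : List Int × Int :=
  (dfsA (graph.length + 1) node path cost visited cycle min_cost graph).getD ([], 0)

-- ===== PORT B =====
-- fuel bound for the while-loop: each pop of an unvisited frame pushes at most #edges children
-- and the per-frame visited set can grow at most #keys times, so (#edges+1)^(#keys+1) pops suffice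
def bFuel (graph : List (Int × List (Int × Int))) : Nat :=
  ((graph.map (fun pr => pr.2.length)).sum + 1) ^ (graph.length + 1)

-- the while-loop: stack frames are (node, path, cost, visited snapshot); pop = head
def loopB : Nat → List (Int × List Int × Int × List Int) → List Int × Int → List (Int × List (Int × Int)) → Option (List Int × Int)
  | _, [], best, _ => some best
  | 0, _ :: _, _, _ => none
  | fuel+1, (n, p, c, vis) :: rest, best, graph =>
    if PySem.Set.contains vis n then
      match p.head? with
      | none => none            -- p[0] : IndexError
      | some h =>
        loopB fuel rest (if n = h ∧ c ≤ best.2 then (p, c) else best) graph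
    else
      match (PySem.Dict.mk graph).get? n with
      | none => none            -- graph[n] : KeyError
      | some adj =>
        loopB fuel
          (adj.reverse.foldl (fun st pr => (pr.1, p ++ [pr.1], c + pr.2, PySem.Set.add vis n) :: st) rest)
          best graph

def dfs_alt (node : Int) (path : List Int) (cost : Int) (visited : List Int) (cycle : List Int) (min_cost : Int) (graph : List (Int × List (Int × Int))) : List Int × Int :=
  (loopB (bFuel graph) [(node, path, cost, visited)] (cycle, min_cost) graph).getD ([], 0)

-- ===== PRECONDITION & SPEC =====
-- Pre_ excludes the inputs on which the Python raises: path = [] with node already visited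
-- (IndexError on path[0]), and missing dict keys (KeyError on graph[node]). The key conditions (only
-- needed when node is unvisited) are a closed-form sufficient bound — every neighbour listed under an
-- unvisited key must itself be a key or initially visited — which is slightly stronger than
-- necessary: A also returns when a missing-key node is simply never reached (see the cited example).
def Pre_dfs (node : Int) (path : List Int) (cost : Int) (visited : List Int) (cycle : List Int) (min_cost : Int) (graph : List (Int × List (Int × Int))) : Prop :=
  (PySem.Set.contains visited node → path ≠ []) ∧
  (¬ PySem.Set.contains visited node →
    ((PySem.Dict.mk graph).get? node).isSome ∧
    ∀ pr ∈ graph, ¬ PySem.Set.contains visited pr.1 → ∀ e ∈ pr.2,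
      ((PySem.Dict.mk graph).get? e.1).isSome ∨ PySem.Set.contains visited e.1)
instance (node : Int) (path : List Int) (cost : Int) (visited : List Int) (cycle : List Int) (min_cost : Int) (graph : List (Int × List (Int × Int))) : Decidable (Pre_dfs node path cost visited cycle min_cost graph) := by unfold Pre_dfs; infer_instance

def pvWitness_dfs : Int × List Int × Int × List Int × List Int × Int × (List (Int × List (Int × Int))) :=
  (0, [0], 0, [], [], 999, [(0, [(1, 1), (2, 5)]), (1, [(0, 2)]), (2, [(0, 1)])])

def Spec_dfs (node : Int) (path : List Int) (cost : Int) (visited : List Int) (cycle : List Int) (min_cost : Int) (graph : List (Int × List (Int × Int))) (out : List Int × Int) : Prop := out = dfs_alt node path cost visited cycle min_cost graph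
instance (node : Int) (path : List Int) (cost : Int) (visited : List Int) (cycle : List Int) (min_cost : Int) (graph : List (Int × List (Int × Int))) (out : List Int × Int) : Decidable (Spec_dfs node path cost visited cycle min_cost graph out) := by unfold Spec_dfs; infer_instance

-- ===== CLAIM (what is proved, stated in full; the proofs are below) =====
def Claim_equal_dfs : Prop := ∀ (node : Int) (path : List Int) (cost : Int) (visited : List Int) (cycle : List Int) (min_cost : Int) (graph : List (Int × List (Int × Int))), Dom_dfs node path cost visited cycle min_cost graph → Pre_dfs node path cost visited cycle min_cost graph → Spec_dfs node path cost visited cycle min_cost graph (dfs node path cost visited cycle min_cost graph)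

-- ===== LEMMAS AND PROOFS =====

-- number of (occurrences of) graph keys not yet in vis: A's recursion fuel gauge
def uKeys (graph : List (Int × List (Int × Int))) (vis : List Int) : Nat :=
  (graph.map Prod.fst).countP (fun k => !(PySem.Set.contains vis k))

-- A's run, frame by frame, with canonical (always-sufficient) fuel: what loopB computes
def specA (graph : List (Int × List (Int × Int))) : List (Int × List Int × Int × List Int) → List Int × Int → Option (List Int × Int)
  | [], best => some best
  | (n, p, c, vis) :: rest, best =>
    (dfsA (uKeys graph vis + 1) n p c vis best.1 best.2 graph).bind fun cm => specA graph rest cm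

-- per-frame weight: an upper bound on the pops its expansion generates
def wFrame (graph : List (Int × List (Int × Int))) (fr : Int × List Int × Int × List Int) : Nat :=
  ((graph.map (fun pr => pr.2.length)).sum + 1) ^ (uKeys graph fr.2.2.2 + 1)

def costS (graph : List (Int × List (Int × Int))) (stack : List (Int × List Int × Int × List Int)) : Nat :=
  (stack.map (wFrame graph)).sum

theorem foldA_none (adj : List (Int × Int)) (f : Int × Int → List Int × Int → Option (List Int × Int)) :
    adj.foldl (fun acc pr => acc.bind fun cm => f pr cm) none = none := by
  induction adj with
  | nil => rfl
  | cons pr rest ih => simpa using ih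

theorem uKeys_le (graph : List (Int × List (Int × Int))) (vis : List Int) :
    uKeys graph vis ≤ graph.length := by
  unfold uKeys
  calc (graph.map Prod.fst).countP _ ≤ (graph.map Prod.fst).length := List.countP_le_length
  _ = graph.length := by simp

theorem get?_mem {graph : List (Int × List (Int × Int))} {n : Int} {adj : List (Int × Int)}
    (h : (PySem.Dict.mk graph).get? n = some adj) : (n, adj) ∈ graph := by
  induction graph with
  | nil => simp [PySem.Dict.get?] at h
  | cons pr rest ih =>
    rw [PySem.Dict.get?_mk_cons] at h
    by_cases he : pr.1 == n
    · simp only [he, if_pos] at h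
      have h1 : pr.1 = n := by simpa using he
      exact List.mem_cons.mpr (Or.inl (by cases pr; simp_all))
    · simp only [he, if_neg, Bool.false_eq_true, not_false_iff] at h
      exact List.mem_cons_of_mem _ (ih h)

theorem uKeys_lt {graph : List (Int × List (Int × Int))} {n : Int} {adj : List (Int × Int)} {vis : List Int}
    (hmem : (n, adj) ∈ graph) (hnv : PySem.Set.contains vis n = false) :
    uKeys graph (PySem.Set.add vis n) < uKeys graph vis := by
  have hn : n ∈ graph.map Prod.fst := List.mem_map.mpr ⟨(n, adj), hmem, rfl⟩
  obtain ⟨s, t, hst⟩ := List.append_of_mem hn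
  unfold uKeys
  rw [hst]
  simp only [List.countP_append, List.countP_cons]
  have hmono : ∀ (l : List Int),
      l.countP (fun k => !(PySem.Set.contains (PySem.Set.add vis n) k))
        ≤ l.countP (fun k => !(PySem.Set.contains vis k)) := by
    intro l
    apply List.countP_mono_left
    intro k _ hk
    simp only [Bool.not_eq_true'] at hk ⊢
    cases hv : PySem.Set.contains vis k with
    | false => rfl
    | true =>
      exfalso
      have hmem2 : k ∈ PySem.Set.add vis n :=
        (PySem.Set.mem_add _ _ _).mpr (Or.inl ((PySem.Set.contains_iff _ _).mp hv))
      rw [(PySem.Set.contains_iff _ _).mpr hmem2] at hk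
      simp at hk
  have h1 := hmono s
  have h2 := hmono t
  have hhead : (!(PySem.Set.contains (PySem.Set.add vis n) n)) = false := by
    simp only [Bool.not_eq_false']
    exact (PySem.Set.contains_iff _ _).mpr ((PySem.Set.mem_add _ _ _).mpr (Or.inr rfl))
  have hhead2 : (!(PySem.Set.contains vis n)) = true := by rw [hnv]; rfl
  rw [hhead, hhead2]
  simp only [if_neg, if_pos, Bool.false_eq_true, not_false_iff]
  omega

theorem adjLen_le {graph : List (Int × List (Int × Int))} {n : Int} {adj : List (Int × Int)}
    (hmem : (n, adj) ∈ graph) : adj.length ≤ (graph.map (fun pr => pr.2.length)).sum := by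
  exact List.single_le_sum (fun x _ => Nat.zero_le x) _ (List.mem_map.mpr ⟨(n, adj), hmem, rfl⟩)

-- fuel irrelevance for A: any fuel strictly above the unvisited-key gauge gives the same result
theorem dfsA_fuel (graph : List (Int × List (Int × Int))) :
    ∀ f g n p c vis cy m, uKeys graph vis < f → uKeys graph vis < g →
    dfsA f n p c vis cy m graph = dfsA g n p c vis cy m graph := by
  intro f
  induction f using Nat.strong_induction_on with
  | _ f ih =>
    intro g n p c vis cy mc hf hg
    cases f with
    | zero => omega
    | succ f' =>
      cases g with
      | zero => omega
      | succ g' =>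
        by_cases hv : PySem.Set.contains vis n = true
        · simp only [dfsA, hv, if_pos]
        · have hnv : PySem.Set.contains vis n = false := by simpa using hv
          simp only [dfsA, hnv, Bool.false_eq_true, if_neg, not_false_iff]
          cases hget : (PySem.Dict.mk graph).get? n with
          | none => rfl
          | some adj =>
            have hmem := get?_mem hget
            have hlt := uKeys_lt hmem hnv
            have hfun : (fun (acc : Option (List Int × Int)) (pr : Int × Int) => acc.bind fun cm =>
                  dfsA f' pr.1 (p ++ [pr.1]) (c + pr.2) (PySem.Set.add vis n) cm.1 cm.2 graph)
                = (fun acc pr => acc.bind fun cm =>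
                  dfsA g' pr.1 (p ++ [pr.1]) (c + pr.2) (PySem.Set.add vis n) cm.1 cm.2 graph) := by
              funext acc pr
              congr 1
              funext cm
              exact ih f' (Nat.lt_succ_self f') g' pr.1 (p ++ [pr.1]) (c + pr.2)
                (PySem.Set.add vis n) cm.1 cm.2 (by omega) (by omega)
            rw [hfun]

theorem push_shape (adj : List (Int × Int)) (mk : Int × Int → Int × List Int × Int × List Int)
    (rest : List (Int × List Int × Int × List Int)) :
    adj.reverse.foldl (fun st pr => mk pr :: st) rest = adj.map mk ++ rest := by
  have gen : ∀ (l : List (Int × Int)) (st : List (Int × List Int × Int × List Int)),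
      l.foldl (fun st pr => mk pr :: st) st = l.reverse.map mk ++ st := by
    intro l
    induction l with
    | nil => intro st; rfl
    | cons x xs ih =>
      intro st
      simp only [List.foldl_cons, List.reverse_cons, List.map_append, List.map_cons,
        List.map_nil, List.append_assoc, List.cons_append, List.nil_append]
      exact ih (mk x :: st)
  rw [gen, List.reverse_reverse]

theorem specA_append (graph : List (Int × List (Int × Int))) (s t : List (Int × List Int × Int × List Int)) (best : List Int × Int) :
    specA graph (s ++ t) best = (specA graph s best).bind fun b => specA graph t b := by
  induction s generalizing best with
  | nil => rfl
  | cons fr rest ih =>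
    obtain ⟨n, p, c, vis⟩ := fr
    simp only [List.cons_append, specA]
    cases dfsA (uKeys graph vis + 1) n p c vis best.1 best.2 graph with
    | none => rfl
    | some cm => exact ih cm

theorem specA_map (graph : List (Int × List (Int × Int))) (adj : List (Int × Int))
    (p : List Int) (c : Int) (vis' : List Int) (best : List Int × Int) :
    specA graph (adj.map (fun pr => (pr.1, p ++ [pr.1], c + pr.2, vis'))) best
      = adj.foldl (fun acc pr => acc.bind fun cm =>
          dfsA (uKeys graph vis' + 1) pr.1 (p ++ [pr.1]) (c + pr.2) vis' cm.1 cm.2 graph) (some best) := by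
  induction adj generalizing best with
  | nil => rfl
  | cons pr rest ih =>
    simp only [List.map_cons, List.foldl_cons, specA, Option.bind_some]
    cases dfsA (uKeys graph vis' + 1) pr.1 (p ++ [pr.1]) (c + pr.2) vis' best.1 best.2 graph with
    | none => exact (foldA_none rest _).symm
    | some cm => exact ih cm

theorem loopB_eq_specA (graph : List (Int × List (Int × Int))) :
    ∀ fb stack best, costS graph stack ≤ fb → loopB fb stack best graph = specA graph stack best := by
  intro fb
  induction fb using Nat.strong_induction_on with
  | _ fb ih =>
    intro stack best hcost
    match stack with
    | [] => cases fb <;> rfl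
    | (n, p, c, vis) :: rest =>
      have hw1 : 1 ≤ wFrame graph (n, p, c, vis) := Nat.one_le_pow _ _ (by omega)
      have hcost' : wFrame graph (n, p, c, vis) + costS graph rest ≤ fb := by
        simpa [costS] using hcost
      cases fb with
      | zero => omega
      | succ fb' =>
        have hrest : costS graph rest ≤ fb' := by omega
        by_cases hv : PySem.Set.contains vis n = true
        · simp only [loopB, specA, hv, if_pos, dfsA]
          cases p.head? with
          | none => rfl
          | some h =>
            show loopB fb' rest (if n = h ∧ c ≤ best.2 then (p, c) else best) graph
              = (if n = h ∧ c ≤ best.2 then some (p, c) else some (best.1, best.2)).bind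
                  fun a => specA graph rest a
            split_ifs with hc
            · have hcr : costS graph rest ≤ fb' := hrest
              simpa using ih fb' (Nat.lt_succ_self fb') rest (p, c) hcr
            · simpa using ih fb' (Nat.lt_succ_self fb') rest best hrest
        · have hnv : PySem.Set.contains vis n = false := by simpa using hv
          simp only [loopB, specA, hnv, Bool.false_eq_true, if_neg, not_false_iff, dfsA]
          cases hget : (PySem.Dict.mk graph).get? n with
          | none => rfl
          | some adj =>
            have hmem := get?_mem hget
            have hlt := uKeys_lt hmem hnv
            show loopB fb'
                (adj.reverse.foldl (fun st pr => (pr.1, p ++ [pr.1], c + pr.2, PySem.Set.add vis n) :: st) rest)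
                best graph
              = (adj.foldl (fun acc pr => acc.bind fun cm =>
                  dfsA (uKeys graph vis) pr.1 (p ++ [pr.1]) (c + pr.2) (PySem.Set.add vis n) cm.1 cm.2 graph)
                  (some (best.1, best.2))).bind fun a => specA graph rest a
            rw [push_shape adj (fun pr => (pr.1, p ++ [pr.1], c + pr.2, PySem.Set.add vis n)) rest]
            -- rewrite the inner fuel (uKeys graph vis) to the canonical one
            have hfun : (fun (acc : Option (List Int × Int)) (pr : Int × Int) => acc.bind fun cm =>
                  dfsA (uKeys graph vis) pr.1 (p ++ [pr.1]) (c + pr.2) (PySem.Set.add vis n) cm.1 cm.2 graph)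
                = (fun acc pr => acc.bind fun cm =>
                  dfsA (uKeys graph (PySem.Set.add vis n) + 1) pr.1 (p ++ [pr.1]) (c + pr.2) (PySem.Set.add vis n) cm.1 cm.2 graph) := by
              funext acc pr
              congr 1
              funext cm
              exact dfsA_fuel graph _ _ pr.1 (p ++ [pr.1]) (c + pr.2)
                (PySem.Set.add vis n) cm.1 cm.2 (by omega) (by omega)
            rw [hfun, show ((best.1, best.2) : List Int × Int) = best from rfl,
              ← specA_map graph adj p c (PySem.Set.add vis n) best,
              ← specA_append graph _ rest best]
            -- cost accounting for the new stack
            apply ih fb' (Nat.lt_succ_self fb')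
            have hsum : costS graph
                ((adj.map (fun pr => (pr.1, p ++ [pr.1], c + pr.2, PySem.Set.add vis n))) ++ rest)
                = adj.length * ((graph.map (fun pr => pr.2.length)).sum + 1) ^ (uKeys graph (PySem.Set.add vis n) + 1)
                  + costS graph rest := by
              simp only [costS, List.map_append, List.sum_append, List.map_map]
              congr 1
              have : (adj.map ((wFrame graph) ∘ (fun pr => (pr.1, p ++ [pr.1], c + pr.2, PySem.Set.add vis n)))) =
                  adj.map (fun _ => ((graph.map (fun pr => pr.2.length)).sum + 1) ^ (uKeys graph (PySem.Set.add vis n) + 1)) := by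
                apply List.map_congr_left
                intro x _
                rfl
              rw [this, List.map_const', List.sum_replicate, smul_eq_mul]
            rw [hsum]
            set E := (graph.map (fun pr => pr.2.length)).sum with hE
            have h1 : adj.length * (E + 1) ^ (uKeys graph (PySem.Set.add vis n) + 1)
                ≤ E * (E + 1) ^ (uKeys graph vis) := by
              apply Nat.mul_le_mul (adjLen_le hmem)
              exact Nat.pow_le_pow_right (by omega) (by omega)
            have h2 : (E + 1) ^ (uKeys graph vis + 1)
                = E * (E + 1) ^ (uKeys graph vis) + (E + 1) ^ (uKeys graph vis) := by
              rw [pow_succ]; ring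
            have h3 : 1 ≤ (E + 1) ^ (uKeys graph vis) := Nat.one_le_pow _ _ (by omega)
            have hcw : wFrame graph (n, p, c, vis) = (E + 1) ^ (uKeys graph vis + 1) := rfl
            rw [hcw] at hcost'
            omega

-- ===== VERDICT (by name: the statement is the Claim_ definition above) =====
theorem dfs_spec : Claim_equal_dfs := by
  intro node path cost visited cycle min_cost graph _ _
  unfold Spec_dfs dfs dfs_alt
  have h1 : dfsA (graph.length + 1) node path cost visited cycle min_cost graph
      = dfsA (uKeys graph visited + 1) node path cost visited cycle min_cost graph :=
    dfsA_fuel graph _ _ node path cost visited cycle min_cost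
      (Nat.lt_succ_of_le (uKeys_le graph visited)) (Nat.lt_succ_self _)
  have h2 : loopB (bFuel graph) [(node, path, cost, visited)] (cycle, min_cost) graph
      = specA graph [(node, path, cost, visited)] (cycle, min_cost) := by
    apply loopB_eq_specA
    unfold costS wFrame bFuel
    simp only [List.map_cons, List.map_nil, List.sum_cons, List.sum_nil, Nat.add_zero]
    exact Nat.pow_le_pow_right (Nat.succ_le_succ (Nat.zero_le _))
      (Nat.succ_le_succ (uKeys_le graph visited))
  rw [h1, h2]
  show _ = (((dfsA (uKeys graph visited + 1) node path cost visited cycle min_cost graph).bind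
      fun cm => specA graph [] cm).getD ([], 0))
  cases dfsA (uKeys graph visited + 1) node path cost visited cycle min_cost graph <;> rfl
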